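-- pv_equiv track=rewrite | github.com/tudny/MIMUW-collection | WBO/WBO-collection/Lab1/main.py | make_graph_edges
-- ===== SOURCE A (Python) =====
-- def make_graph_edges(seq_kmers: list):
--     graph = {}
--
--     def new(a):
--         if a not in graph:
--             graph[a] = []
--
--     def insert(a, b):
--         new(a)
--         new(b)
--         graph[a].append(b)
--
--     for node_a in seq_kmers:
--         for node_b in seq_kmers:
--             if node_a[:-1] == node_b[1:]:
--                 insert(node_b, node_a)
--     return graph
-- ===== SOURCE B (Python) =====
-- def make_graph_edges(seq_kmers: list):
--     # Index kmers by their suffix once, then look up each kmer's prefix: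
--     # O(n*k + edges) instead of scanning all O(n^2) pairs.
--     by_suffix = {}
--     for b in seq_kmers:
--         by_suffix.setdefault(b[1:], []).append(b)
--     graph = {}
--     for a in seq_kmers:
--         for b in by_suffix.get(a[:-1], ()):
--             if b not in graph:
--                 graph[b] = []
--             if a not in graph:
--                 graph[a] = []
--             graph[b].append(a)
--     return graph
-- ===== Notes on version B (the rewrite author's own statement) =====
-- stated objective: faster
-- what changed: Replaced the all-pairs scan with a one-pass dict indexing kmers by their suffix, so each kmer's predecessor list is found by a single prefix lookup instead of an inner scan over all kmers.
import Mathlib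
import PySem

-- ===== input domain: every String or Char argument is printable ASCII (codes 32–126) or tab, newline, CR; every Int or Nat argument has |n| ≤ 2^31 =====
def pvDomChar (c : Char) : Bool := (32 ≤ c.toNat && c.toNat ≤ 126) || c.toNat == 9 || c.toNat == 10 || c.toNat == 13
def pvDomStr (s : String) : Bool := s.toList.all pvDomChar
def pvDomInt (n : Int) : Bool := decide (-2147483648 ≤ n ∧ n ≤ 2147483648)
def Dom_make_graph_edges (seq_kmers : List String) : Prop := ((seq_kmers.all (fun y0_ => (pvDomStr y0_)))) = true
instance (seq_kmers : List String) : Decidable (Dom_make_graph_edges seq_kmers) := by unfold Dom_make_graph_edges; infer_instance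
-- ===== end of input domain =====

-- B indexes the kmers by suffix in one pass and looks up each kmer's prefix, replacing A's all-pairs scan (faster: asymptotic, measured).

-- ===== PORT A =====
-- helper `new(a)`: if a not in graph: graph[a] = []
def pvNew (g : PySem.Dict String (List String)) (a : String) : PySem.Dict String (List String) :=
  if g.contains a then g else g.insert a []

-- helper `insert(a, b)`: new(a); new(b); graph[a].append(b)
def pvInsert (g : PySem.Dict String (List String)) (a b : String) : PySem.Dict String (List String) :=
  ((pvNew (pvNew g a) b).modify a [] (· ++ [b]))

def make_graph_edges (seq_kmers : List String) : List (String × List String) :=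
  (seq_kmers.foldl (fun g node_a =>
    seq_kmers.foldl (fun g node_b =>
      if PySem.Str.slice node_a none (some (-1)) == PySem.Str.slice node_b (some 1) none then
        pvInsert g node_b node_a
      else g) g) PySem.Dict.empty).items

-- ===== PORT B =====
def make_graph_edges_alt (seq_kmers : List String) : List (String × List String) :=
  let by_suffix : PySem.Dict String (List String) :=
    seq_kmers.foldl (fun d b =>
      d.modify (PySem.Str.slice b (some 1) none) [] (· ++ [b])) PySem.Dict.empty
  (seq_kmers.foldl (fun g a =>
    (by_suffix.getD (PySem.Str.slice a none (some (-1))) []).foldl (fun g b =>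
      let g := if g.contains b then g else g.insert b []
      let g := if g.contains a then g else g.insert a []
      g.modify b [] (· ++ [a])) g) PySem.Dict.empty).items

-- ===== PRECONDITION & SPEC =====
def Spec_make_graph_edges (seq_kmers : List String) (out : List (String × List String)) : Prop := out = make_graph_edges_alt seq_kmers
instance (seq_kmers : List String) (out : List (String × List String)) : Decidable (Spec_make_graph_edges seq_kmers out) := by unfold Spec_make_graph_edges; infer_instance

-- ===== CLAIM (what is proved, stated in full; the proofs are below) =====
def Claim_equal_make_graph_edges : Prop := ∀ (seq_kmers : List String), Dom_make_graph_edges seq_kmers → Spec_make_graph_edges seq_kmers (make_graph_edges seq_kmers)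

-- ===== LEMMAS AND PROOFS =====

-- the suffix index holds exactly the kmers whose suffix matches, in input order
theorem bySuffix_getD (seq : List String) (s : String) :
    (seq.foldl (fun d b =>
      d.modify (PySem.Str.slice b (some 1) none) [] (· ++ [b])) PySem.Dict.empty).getD s []
    = seq.filter (fun b => PySem.Str.slice b (some 1) none == s) := by
  have hmap : seq.foldl (fun d b =>
      d.modify (PySem.Str.slice b (some 1) none) [] (· ++ [b])) PySem.Dict.empty
      = (seq.map (fun b => (PySem.Str.slice b (some 1) none, b))).foldl
          (fun d p => d.modify p.1 [] (· ++ [p.2])) PySem.Dict.empty := by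
    rw [List.foldl_map]
  rw [hmap, PySem.Dict.getD_foldl_modify_append]
  simp [List.filter_map, Function.comp_def]

theorem inner_step_eq (a : String) :
    (fun (g : PySem.Dict String (List String)) (b : String) =>
      let g := if g.contains b then g else g.insert b []
      let g := if g.contains a then g else g.insert a []
      g.modify b [] (· ++ [a]))
    = fun g b => pvInsert g b a := by
  funext g b
  rfl

-- ===== VERDICT (by name: the statement is the Claim_ definition above) =====
theorem make_graph_edges_spec : Claim_equal_make_graph_edges := by
  intro seq _
  unfold Spec_make_graph_edges make_graph_edges make_graph_edges_alt
  show PySem.Dict.items _ = PySem.Dict.items _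
  refine congrArg PySem.Dict.items ?_
  apply PySem.List.foldl_congr_mem
  intro g a _
  rw [bySuffix_getD, inner_step_eq, List.foldl_filter]
  apply PySem.List.foldl_congr_mem
  intro g' b _
  have hb : (PySem.Str.slice a none (some (-1)) == PySem.Str.slice b (some 1)) = (PySem.Str.slice b (some 1) == PySem.Str.slice a none (some (-1))) := by
    rw [beq_eq_decide, beq_eq_decide]
    exact decide_eq_decide.mpr eq_comm
  rw [hb]
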